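-- pv_equiv track=rewrite | github.com/teambi0s/InCTFi | 2020/Reversing/ArchRide/Admin/src/template1.py | alterstring
-- ===== SOURCE A (Python) =====
-- def alterstring(string):
--     val1 = ""
--     val2 = ""
--     for i in range(len(string)):
--         if(i % 2 == 0):
--             val1 += string[i]
--         else:
--             val2 += string[i]
--     return (val1 + val2)
-- ===== SOURCE B (Python) =====
-- def alterstring(string):
--     return string[::2] + string[1::2]
-- ===== Notes on version B (the rewrite author's own statement) =====
-- stated objective: idiomatic
-- what changed: Replaces the explicit index loop with its i%2 branch and two string accumulators by a single expression of two strided slices, string[::2] + string[1::2].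
import Mathlib
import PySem

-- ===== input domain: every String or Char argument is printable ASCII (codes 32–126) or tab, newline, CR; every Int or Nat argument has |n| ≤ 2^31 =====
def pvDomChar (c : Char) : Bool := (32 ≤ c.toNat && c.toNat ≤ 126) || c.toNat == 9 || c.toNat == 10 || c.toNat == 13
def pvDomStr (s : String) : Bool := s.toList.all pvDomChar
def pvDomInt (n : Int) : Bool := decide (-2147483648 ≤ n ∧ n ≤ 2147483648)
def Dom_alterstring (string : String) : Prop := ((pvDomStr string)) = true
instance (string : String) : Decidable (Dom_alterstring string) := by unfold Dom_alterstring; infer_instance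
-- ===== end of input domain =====

-- B replaces A's index loop (i%2 branch filling two accumulators) by the two strided slices
-- string[::2] + string[1::2]: an idiomatic single-expression form of the even-then-odd reorder.

-- ===== PORT A =====
-- loop body: the in-range index i is read with pyGetD (Python's string[i] never raises here)
def alterstringStep (cs : List Char) (acc : List Char × List Char) (i : Int) : List Char × List Char :=
  if PySem.Int.mod i 2 = 0 then (acc.1 ++ [PySem.List.pyGetD cs i ' '], acc.2)
  else (acc.1, acc.2 ++ [PySem.List.pyGetD cs i ' '])

def alterstring (string : String) : String :=
  let cs := string.toList
  let r := (PySem.List.pyRange 0 (PySem.Str.len string) 1).foldl (alterstringStep cs) ([], [])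
  String.ofList (r.1 ++ r.2)

-- ===== PORT B =====
def alterstring_alt (string : String) : String :=
  String.ofList ((PySem.List.slice? string.toList none none 2).getD []
    ++ (PySem.List.slice? string.toList (some 1) none 2).getD [])

-- ===== PRECONDITION & SPEC =====
def Spec_alterstring (string : String) (out : String) : Prop := out = alterstring_alt string
instance (string : String) (out : String) : Decidable (Spec_alterstring string out) := by unfold Spec_alterstring; infer_instance

-- ===== CLAIM (what is proved, stated in full; the proofs are below) =====
def Claim_equal_alterstring : Prop := ∀ (string : String), Dom_alterstring string → Spec_alterstring string (alterstring string)

-- ===== LEMMAS AND PROOFS =====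

-- the characters of cs at even (b = true) resp. odd (b = false) positions, in order
def pvPick {α : Type} (b : Bool) : List α → List α
  | [] => []
  | a :: t => if b then a :: pvPick false t else pvPick true t

theorem pvFilterMap_even {α : Type} : ∀ (xs : List α),
    List.filterMap (fun k => xs[2 * k]?) (List.range ((xs.length + 1) / 2)) = pvPick true xs
  | [] => by simp [pvPick]
  | [a] => by simp [pvPick, List.range_succ]
  | a :: b :: t => by
    have hlen : (a :: b :: t).length + 1 = (t.length + 1) + 2 := by simp
    rw [hlen, show ((t.length + 1) + 2) / 2 = (t.length + 1) / 2 + 1 by omega,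
        List.range_succ_eq_map, List.filterMap_cons, List.filterMap_map]
    have hf : ((fun k => (a :: b :: t)[2 * k]?) ∘ Nat.succ) = (fun k => t[2 * k]?) := by
      funext k
      show (a :: b :: t)[2 * (k + 1)]? = t[2 * k]?
      rw [show 2 * (k + 1) = 2 * k + 1 + 1 by omega]
      simp
    rw [hf, pvFilterMap_even t]
    simp [pvPick]

theorem pvFilterMap_odd {α : Type} : ∀ (xs : List α),
    List.filterMap (fun k => xs[2 * k + 1]?) (List.range (xs.length / 2)) = pvPick false xs
  | [] => by simp [pvPick]
  | [a] => by simp [pvPick]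
  | a :: b :: t => by
    have hlen : (a :: b :: t).length = t.length + 2 := by simp
    rw [hlen, show (t.length + 2) / 2 = t.length / 2 + 1 by omega,
        List.range_succ_eq_map, List.filterMap_cons, List.filterMap_map]
    have hf : ((fun k => (a :: b :: t)[2 * k + 1]?) ∘ Nat.succ) = (fun k => t[2 * k + 1]?) := by
      funext k
      show (a :: b :: t)[2 * (k + 1) + 1]? = t[2 * k + 1]?
      rw [show 2 * (k + 1) + 1 = 2 * k + 1 + 1 + 1 by omega]
      simp
    rw [hf, pvFilterMap_odd t]
    simp [pvPick]

theorem pvSlice2_even {α : Type} (xs : List α) :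
    PySem.List.slice? xs none none 2 = some (pvPick true xs) := by
  rw [PySem.List.slice?, PySem.List.sliceIndices]
  simp only [if_neg (by norm_num : ¬ (2:Int) = 0), if_neg (by norm_num : ¬ (2:Int) < 0)]
  have hcnt : (if (0:Int) < 2 then
        if (0:Int) < (xs.length:Int) then (((xs.length:Int) - 0 + 2 - 1) / 2).toNat else 0
      else if (xs.length:Int) < 0 then (((0:Int) - xs.length + -2 - 1) / -2).toNat else 0)
      = (xs.length + 1) / 2 := by
    split_ifs <;> omega
  rw [hcnt]
  have hf : (fun k : Nat => xs[((0:Int) + 2 * (k:Int)).toNat]?) = (fun k => xs[2 * k]?) := by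
    funext k
    congr 1
    omega
  rw [hf, pvFilterMap_even]

theorem pvSlice2_odd {α : Type} (xs : List α) :
    PySem.List.slice? xs (some 1) none 2 = some (pvPick false xs) := by
  rw [PySem.List.slice?, PySem.List.sliceIndices]
  simp only [if_neg (by norm_num : ¬ (2:Int) = 0), if_neg (by norm_num : ¬ (2:Int) < 0),
    if_neg (by norm_num : ¬ (1:Int) < 0)]
  rcases xs with _ | ⟨a, t⟩
  · simp [pvPick]
  · have hstart : min (1:Int) ((a :: t).length : Int) = 1 := by simp
    rw [hstart]
    have hcnt : (if (0:Int) < 2 then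
          if (1:Int) < ((a :: t).length:Int) then ((((a :: t).length:Int) - 1 + 2 - 1) / 2).toNat else 0
        else if ((a :: t).length:Int) < 1 then (((1:Int) - (a :: t).length + -2 - 1) / -2).toNat else 0)
        = (a :: t).length / 2 := by
      split_ifs <;> simp_all <;> omega
    rw [hcnt]
    have hf : (fun k : Nat => (a :: t)[((1:Int) + 2 * (k:Int)).toNat]?) = (fun k => (a :: t)[2 * k + 1]?) := by
      funext k
      congr 1
      omega
    rw [hf, pvFilterMap_odd]

-- A's loop invariant: folding the body over indices j, j+1, …, len-1 appends the even/odd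
-- halves of the remaining suffix (swapped when j is odd) to the two accumulators.
theorem pvLoopInv (cs : List Char) : ∀ (t : List Char) (j : Nat) (v1 v2 : List Char),
    cs.drop j = t →
    ((List.range t.length).map (fun k => ((j + k : Nat) : Int))).foldl (alterstringStep cs) (v1, v2)
      = (v1 ++ (if j % 2 = 0 then pvPick true t else pvPick false t),
         v2 ++ (if j % 2 = 0 then pvPick false t else pvPick true t))
  | [], j, v1, v2, _ => by simp [pvPick]
  | a :: t, j, v1, v2, hdrop => by
    have hget : cs.getD j ' ' = a := by
      have : cs[j]? = some a := by
        have h0 : (List.drop j cs)[0]? = some a := by rw [hdrop]; rfl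
        rw [List.getElem?_drop] at h0
        simpa using h0
      simp [List.getD, this]
    rw [show (a :: t).length = t.length + 1 from rfl, List.range_succ_eq_map, List.map_cons,
        List.foldl_cons, List.map_map]
    have hfm : ((fun k => ((j + k : Nat) : Int)) ∘ Nat.succ) = (fun k => (((j + 1) + k : Nat) : Int)) := by
      funext k
      show ((j + (k + 1) : Nat) : Int) = (((j + 1) + k : Nat) : Int)
      omega
    have hdrop' : cs.drop (j + 1) = t := by
      rw [← List.drop_drop, hdrop]
      rfl
    have hstep0 : alterstringStep cs (v1, v2) ((j : Nat) : Int)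
        = if j % 2 = 0 then (v1 ++ [a], v2) else (v1, v2 ++ [a]) := by
      rw [alterstringStep]
      have hm : PySem.Int.mod ((j : Nat) : Int) 2 = ((j % 2 : Nat) : Int) := by
        exact_mod_cast PySem.Int.mod_natCast j 2
      rw [hm, PySem.List.pyGetD_natCast, hget]
      rcases Nat.mod_two_eq_zero_or_one j with h | h <;> simp [h]
    rw [hfm]
    simp only [Nat.add_zero]
    rw [hstep0]
    by_cases h : j % 2 = 0
    · rw [if_pos h]
      rw [pvLoopInv cs t (j + 1) (v1 ++ [a]) v2 hdrop']
      have h1 : (j + 1) % 2 ≠ 0 := by omega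
      simp [h, h1, pvPick]
    · rw [if_neg h]
      rw [pvLoopInv cs t (j + 1) v1 (v2 ++ [a]) hdrop']
      have h1 : (j + 1) % 2 = 0 := by omega
      simp [h, h1, pvPick]

-- ===== VERDICT (by name: the statement is the Claim_ definition above) =====
theorem alterstring_spec : Claim_equal_alterstring := by
  intro s _
  show alterstring s = alterstring_alt s
  rw [alterstring, alterstring_alt, PySem.Str.len_eq, PySem.List.pyRange_zero_natCast,
      pvSlice2_even, pvSlice2_odd]
  have hm : (List.map (fun k : Nat => (k : Int)) (List.range s.toList.length))
      = (List.range s.toList.length).map (fun k => ((0 + k : Nat) : Int)) := by simp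
  rw [hm, pvLoopInv s.toList s.toList 0 [] [] (by simp)]
  simp
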